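-- pv_equiv track=rewrite | github.com/GolddBunny/QA-Maker | backend/services/crawling_service/html_Structuring.py | filter_urls_by_patterns
-- ===== SOURCE A (Python) =====
-- def filter_urls_by_patterns(urls, patterns):
--     """URL 리스트에서 특정 패턴이 포함된 URL을 필터링하는 함수
--
--     Args:
--         urls: URL 리스트
--         patterns: 필터링할 패턴 리스트
--
--     Returns:
--         tuple: (패턴에 매칭되는 URL 리스트, 매칭되지 않는 URL 리스트)
--     """
--     matched_urls = []
--     unmatched_urls = []
--
--     for url in urls:
--         if any(pattern in url for pattern in patterns):
--             matched_urls.append(url)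
--         else:
--             unmatched_urls.append(url)
--
--     return matched_urls, unmatched_urls
-- ===== SOURCE B (Python) =====
-- def filter_urls_by_patterns(urls, patterns):
--     # loop inversion with narrowing: each pattern scans only the urls no earlier pattern
--     # matched, and the remaining pool shrinks only when a pattern actually hit;
--     # matched indices collect in a set, the two lists are rebuilt in url order
--     remaining = list(enumerate(urls))
--     matched = set()
--     for p in patterns:
--         if not remaining:
--             break
--         hit = [k for k, u in remaining if p in u]
--         if hit:
--             matched.update(hit)
--             remaining = [(k, u) for k, u in remaining if p not in u]
--     return ([u for k, u in enumerate(urls) if k in matched],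
--             [u for k, u in enumerate(urls) if k not in matched])
-- ===== Notes on version B (the rewrite author's own statement) =====
-- stated objective: alternative
-- what changed: B inverts A's loops: instead of A's single pass over urls testing each url against all patterns with any(), B iterates patterns over a shrinking pool of still-unmatched (index, url) pairs, collects matched indices in a set, and rebuilds both lists from the flags in url order.
import Mathlib
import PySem

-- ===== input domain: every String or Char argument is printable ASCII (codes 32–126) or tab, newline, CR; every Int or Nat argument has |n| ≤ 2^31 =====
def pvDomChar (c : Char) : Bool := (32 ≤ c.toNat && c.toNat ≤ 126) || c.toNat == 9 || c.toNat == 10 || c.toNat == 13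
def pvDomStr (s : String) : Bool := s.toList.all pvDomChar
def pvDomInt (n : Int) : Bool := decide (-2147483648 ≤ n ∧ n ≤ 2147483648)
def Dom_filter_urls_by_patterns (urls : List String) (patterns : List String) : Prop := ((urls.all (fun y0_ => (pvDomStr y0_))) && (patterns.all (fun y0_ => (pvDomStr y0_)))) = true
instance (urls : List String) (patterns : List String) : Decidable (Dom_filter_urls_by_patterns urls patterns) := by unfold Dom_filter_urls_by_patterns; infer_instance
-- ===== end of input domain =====

-- B inverts A's loops: each pattern scans only the still-unmatched urls (a shrinking pool),
-- matched indices collect in a set and the two lists are rebuilt in url order; objective: alternative.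

-- ===== PORT A =====
def filter_urls_by_patterns (urls : List String) (patterns : List String) : List String × List String :=
  urls.foldl
    (fun acc url =>
      if patterns.any (fun pattern => PySem.Str.isIn pattern url)
      then (acc.1 ++ [url], acc.2)
      else (acc.1, acc.2 ++ [url]))
    ([], [])

-- ===== PORT B =====
-- the 'for p in patterns' loop of Source B, with its early 'break' and its 'if hit:' guard
def pvNarrow (patterns : List String) (remaining : List (Int × String)) (matched : PySem.Set Int) : PySem.Set Int :=
  match patterns with
  | [] => matched
  | p :: ps =>
    if remaining = [] then matched
    else
      let hit := (remaining.filter (fun ku => PySem.Str.isIn p ku.2)).map (fun ku => ku.1)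
      if hit = [] then pvNarrow ps remaining matched
      else pvNarrow ps (remaining.filter (fun ku => !PySem.Str.isIn p ku.2)) (PySem.Set.update matched hit)

def filter_urls_by_patterns_alt (urls : List String) (patterns : List String) : List String × List String :=
  let mset := pvNarrow patterns (PySem.List.enumerate urls 0) PySem.Set.empty
  (((PySem.List.enumerate urls 0).filter (fun ku => PySem.Set.contains mset ku.1)).map (fun ku => ku.2),
   ((PySem.List.enumerate urls 0).filter (fun ku => !PySem.Set.contains mset ku.1)).map (fun ku => ku.2))

-- ===== PRECONDITION & SPEC =====
def Spec_filter_urls_by_patterns (urls : List String) (patterns : List String) (out : List String × List String) : Prop := out = filter_urls_by_patterns_alt urls patterns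
instance (urls : List String) (patterns : List String) (out : List String × List String) : Decidable (Spec_filter_urls_by_patterns urls patterns out) := by unfold Spec_filter_urls_by_patterns; infer_instance

-- ===== CLAIM (what is proved, stated in full; the proofs are below) =====
def Claim_equal_filter_urls_by_patterns : Prop := ∀ (urls : List String) (patterns : List String), Dom_filter_urls_by_patterns urls patterns → Spec_filter_urls_by_patterns urls patterns (filter_urls_by_patterns urls patterns)

-- ===== LEMMAS AND PROOFS =====

-- membership in the narrowed set: an index is collected iff some pattern matches its url
theorem pvNarrow_mem (ps : List String) : ∀ (rem : List (Int × String)) (acc : PySem.Set Int) (k : Int),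
    k ∈ pvNarrow ps rem acc ↔
      k ∈ acc ∨ ∃ u, (k, u) ∈ rem ∧ ps.any (fun p => PySem.Str.isIn p u) = true := by
  induction ps with
  | nil => intro rem acc k; simp [pvNarrow]
  | cons p ps ih =>
    intro rem acc k
    rw [pvNarrow]
    by_cases hrem : rem = []
    · simp [hrem]
    · rw [if_neg hrem]
      by_cases hhit : (rem.filter (fun ku => PySem.Str.isIn p ku.2)).map (fun ku => ku.1) = []
      · rw [if_pos hhit, ih]
        have hnone : ∀ ku ∈ rem, PySem.Str.isIn p ku.2 = false := by
          rw [List.map_eq_nil_iff, List.filter_eq_nil_iff] at hhit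
          intro ku hku
          simpa using hhit ku hku
        constructor
        · rintro (h | ⟨u, hu, hany⟩)
          · exact Or.inl h
          · exact Or.inr ⟨u, hu, by rw [List.any_cons, Bool.or_eq_true]; exact Or.inr hany⟩
        · rintro (h | ⟨u, hu, hany⟩)
          · exact Or.inl h
          · refine Or.inr ⟨u, hu, ?_⟩
            rw [List.any_cons, Bool.or_eq_true] at hany
            rcases hany with hp | hany
            · rw [hnone (k, u) hu] at hp; cases hp
            · exact hany
      · rw [if_neg hhit, ih]
        simp only [PySem.Set.mem_update, List.mem_map, List.mem_filter, List.any_cons,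
          Bool.or_eq_true, Bool.not_eq_eq_eq_not, Bool.not_true]
        constructor
        · rintro ((h | ⟨⟨k', u⟩, ⟨hu, hp⟩, rfl⟩) | ⟨u, ⟨hu, hnp⟩, hany⟩)
          · exact Or.inl h
          · exact Or.inr ⟨u, hu, Or.inl hp⟩
          · exact Or.inr ⟨u, hu, Or.inr hany⟩
        · rintro (h | ⟨u, hu, hp | hany⟩)
          · exact Or.inl (Or.inl h)
          · exact Or.inl (Or.inr ⟨(k, u), ⟨hu, hp⟩, rfl⟩)
          · by_cases hp : PySem.Str.isIn p u = true
            · exact Or.inl (Or.inr ⟨(k, u), ⟨hu, hp⟩, rfl⟩)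
            · exact Or.inr ⟨u, ⟨hu, by simpa using hp⟩, hany⟩

-- an index occurs at most once in an enumeration
theorem pv_enum_unique {α : Type} (xs : List α) (s k : Int) (u u' : α)
    (h1 : (k, u) ∈ PySem.List.enumerate xs s) (h2 : (k, u') ∈ PySem.List.enumerate xs s) : u = u' := by
  rw [PySem.List.mem_enumerate_iff] at h1 h2
  obtain ⟨j, hj, e1⟩ := h1
  obtain ⟨j', hj', e2⟩ := h2
  rw [Prod.mk.injEq] at e1 e2
  have : j = j' := by omega
  subst this
  rw [e1.2, e2.2]

-- rebuilding a list from its enumeration, filtered through a flag set that encodes a predicate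
theorem pv_rebuild (m : String → Bool) (S : PySem.Set Int) (q : Bool → Bool) :
    ∀ (us : List String) (s : Int),
      (∀ k u, (k, u) ∈ PySem.List.enumerate us s → (k ∈ S ↔ m u = true)) →
      ((PySem.List.enumerate us s).filter (fun ku => q (PySem.Set.contains S ku.1))).map (fun ku => ku.2)
        = us.filter (fun u => q (m u)) := by
  intro us
  induction us with
  | nil => intro s _; simp [PySem.List.enumerate_nil]
  | cons u t iht =>
    intro s h
    rw [PySem.List.enumerate_cons]
    have hm : PySem.Set.contains S s = m u := by
      have hiff := h s u (by rw [PySem.List.enumerate_cons]; exact List.mem_cons_self)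
      rw [Bool.eq_iff_iff, PySem.Set.contains_iff]
      exact hiff
    have ht : ((PySem.List.enumerate t (s + 1)).filter (fun ku => q (PySem.Set.contains S ku.1))).map (fun ku => ku.2)
        = t.filter (fun u => q (m u)) := by
      refine iht (s + 1) ?_
      intro k v hkv
      exact h k v (by rw [PySem.List.enumerate_cons]; exact List.mem_cons_of_mem _ hkv)
    simp only [List.filter_cons, hm]
    cases q (m u)
    · simpa using ht
    · simpa using ht

-- ===== VERDICT (by name: the statement is the Claim_ definition above) =====
theorem filter_urls_by_patterns_spec : Claim_equal_filter_urls_by_patterns := by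
  intro urls patterns _
  show filter_urls_by_patterns urls patterns = filter_urls_by_patterns_alt urls patterns
  unfold filter_urls_by_patterns filter_urls_by_patterns_alt
  show _ = ((((PySem.List.enumerate urls 0).filter (fun ku => PySem.Set.contains (pvNarrow patterns (PySem.List.enumerate urls 0) PySem.Set.empty) ku.1)).map (fun ku => ku.2)),
            (((PySem.List.enumerate urls 0).filter (fun ku => !PySem.Set.contains (pvNarrow patterns (PySem.List.enumerate urls 0) PySem.Set.empty) ku.1)).map (fun ku => ku.2)))
  have hmem : ∀ k u, (k, u) ∈ PySem.List.enumerate urls 0 →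
      (k ∈ pvNarrow patterns (PySem.List.enumerate urls 0) PySem.Set.empty ↔
        patterns.any (fun p => PySem.Str.isIn p u) = true) := by
    intro k u hku
    rw [pvNarrow_mem]
    constructor
    · rintro (h | ⟨u', hu', hany⟩)
      · simp [PySem.Set.empty] at h
      · rwa [pv_enum_unique urls 0 k u u' hku hu']
    · intro hany
      exact Or.inr ⟨u, hku, hany⟩
  rw [pv_rebuild (fun u => patterns.any (fun p => PySem.Str.isIn p u)) _ (fun b => b) urls 0 hmem,
      pv_rebuild (fun u => patterns.any (fun p => PySem.Str.isIn p u)) _ (fun b => !b) urls 0 hmem]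
  have hfun : (fun (acc : List String × List String) url =>
      if patterns.any (fun pattern => PySem.Str.isIn pattern url)
      then (acc.1 ++ [url], acc.2)
      else (acc.1, acc.2 ++ [url]))
    = (fun acc url =>
      (if patterns.any (fun pattern => PySem.Str.isIn pattern url) then acc.1 ++ [url] else acc.1,
       if !(patterns.any (fun pattern => PySem.Str.isIn pattern url)) then acc.2 ++ [url] else acc.2)) := by
    funext acc url
    cases h : patterns.any (fun pattern => PySem.Str.isIn pattern url)
    · simp
    · simp
  rw [hfun,
      PySem.List.foldl_prod_mk
        (f := fun m u => if patterns.any (fun pattern => PySem.Str.isIn pattern u) then m ++ [u] else m)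
        (g := fun um u => if !(patterns.any (fun pattern => PySem.Str.isIn pattern u)) then um ++ [u] else um),
      PySem.List.foldl_append_if_eq_filter, PySem.List.foldl_append_if_eq_filter]
  simp
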